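-- pv_equiv track=rewrite | github.com/jaizunT/blockblastRL | blockblast_status.py | generate_class_masks
-- ===== SOURCE A (Python) =====
-- def is_connected(mask, w, h, diagonal=True):
--     cells = [(x, y) for y in range(h) for x in range(w) if mask & (1 << (y * w + x))]
--     if not cells:
--         return False
--     stack = [cells[0]]
--     seen = set([cells[0]])
--     while stack:
--         x, y = stack.pop()
--         for dx, dy in ((-1, 0), (1, 0), (0, -1), (0, 1)):
--             nx, ny = x + dx, y + dy
--             if 0 <= nx < w and 0 <= ny < h and (nx, ny) not in seen:
--                 if mask & (1 << (ny * w + nx)):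
--                     seen.add((nx, ny))
--                     stack.append((nx, ny))
--         if diagonal:
--             for dx, dy in ((-1, -1), (-1, 1), (1, -1), (1, 1)):
--                 nx, ny = x + dx, y + dy
--                 if 0 <= nx < w and 0 <= ny < h and (nx, ny) not in seen:
--                     if mask & (1 << (ny * w + nx)):
--                         seen.add((nx, ny))
--                         stack.append((nx, ny))
--     return len(seen) == len(cells)
--
-- def mask_to_array(mask, w, h):
--     return [
--         [1 if mask & (1 << (y * w + x)) else 0 for x in range(w)]
--         for y in range(h)
--     ]
--
-- def generate_class_masks(w, h, diagonal=True):
--     total = w * h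
--     masks = []
--     for mask in range(1, 1 << total):
--         if not is_connected(mask, w, h, diagonal=diagonal):
--             continue
--         cells = [(x, y) for y in range(h) for x in range(w) if mask & (1 << (y * w + x))]
--         min_x = min(x for x, _ in cells)
--         max_x = max(x for x, _ in cells)
--         min_y = min(y for _, y in cells)
--         max_y = max(y for _, y in cells)
--         if (max_x - min_x + 1) != w or (max_y - min_y + 1) != h:
--             continue
--         masks.append(mask_to_array(mask, w, h))
--     return masks
-- ===== SOURCE B (Python) =====
-- def _adjacent(a, b, diagonal):
--     dirs = ((-1, 0), (1, 0), (0, -1), (0, 1))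
--     if diagonal:
--         dirs = dirs + ((-1, -1), (-1, 1), (1, -1), (1, 1))
--     return (b[0] - a[0], b[1] - a[1]) in dirs
--
--
-- def _connected(cells, diagonal):
--     # level-synchronous closure: grow seen by whole frontiers, no stack
--     seen = [cells[0]]
--     frontier = [cells[0]]
--     while frontier:
--         frontier = [c for c in cells
--                     if c not in seen and any(_adjacent(f, c, diagonal) for f in frontier)]
--         seen.extend(frontier)
--     return len(seen) == len(cells)
--
--
-- def generate_class_masks(w, h, diagonal=True):
--     total = w * h
--     out = []
--     for mask in range(1, 1 << total):
--         cells = [(x, y) for y in range(h) for x in range(w) if mask & (1 << (y * w + x))]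
--         if not cells:
--             continue
--         min_x, min_y = cells[0]
--         max_x, max_y = cells[0]
--         for x, y in cells:
--             if x < min_x:
--                 min_x = x
--             if x > max_x:
--                 max_x = x
--             if y < min_y:
--                 min_y = y
--             if y > max_y:
--                 max_y = y
--         if max_x - min_x + 1 != w or max_y - min_y + 1 != h:
--             continue
--         if not _connected(cells, diagonal):
--             continue
--         out.append([[1 if mask & (1 << (y * w + x)) else 0 for x in range(w)]
--                     for y in range(h)])
--     return out
-- ===== Notes on version B (the rewrite author's own statement) =====
-- stated objective: alternative
-- what changed: The stack-based DFS flood fill with a seen-set is replaced by a level-synchronous frontier closure (seen grows by whole frontiers computed from one scan of the cell list, no stack), the four separate min/max generator passes by a single bounding-box fold, the cell list is computed once per mask instead of twice, and the cheap bounding-box test is performed before the connectivity test.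
import Mathlib
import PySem

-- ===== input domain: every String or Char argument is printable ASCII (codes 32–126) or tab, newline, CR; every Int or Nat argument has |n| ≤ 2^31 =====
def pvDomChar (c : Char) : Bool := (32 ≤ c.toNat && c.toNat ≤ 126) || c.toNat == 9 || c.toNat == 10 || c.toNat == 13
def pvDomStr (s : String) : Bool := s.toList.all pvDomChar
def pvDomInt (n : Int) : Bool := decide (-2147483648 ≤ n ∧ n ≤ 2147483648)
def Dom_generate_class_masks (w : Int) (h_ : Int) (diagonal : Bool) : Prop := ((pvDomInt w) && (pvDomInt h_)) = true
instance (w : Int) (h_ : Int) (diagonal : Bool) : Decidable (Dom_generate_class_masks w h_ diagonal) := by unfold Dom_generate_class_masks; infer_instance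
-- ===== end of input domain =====

-- B replaces A's stack-based DFS flood fill by a level-synchronous frontier closure and the four
-- min/max scans by one bounding-box fold done before the connectivity test (objective: alternative).

-- ===== PORT A =====

-- `mask & (1 << (y*w+x))` on a nonnegative mask; the index y*w+x is ≥ 0 wherever A evaluates it.
def pvBit (mask : Nat) (w : Int) (x y : Int) : Bool := mask.testBit (y * w + x).toNat

-- [(x, y) for y in range(h) for x in range(w) if mask & (1 << (y * w + x))]
def pvCellsA (mask : Nat) (w h : Int) : List (Int × Int) :=
  (PySem.List.pyRange 0 h 1).flatMap (fun y =>
    (PySem.List.pyRange 0 w 1).filterMap (fun x =>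
      if pvBit mask w x y then some (x, y) else none))

def pvDirs4 : List (Int × Int) := [(-1, 0), (1, 0), (0, -1), (0, 1)]
def pvDirsDiag : List (Int × Int) := [(-1, -1), (-1, 1), (1, -1), (1, 1)]

-- body of A's `for dx, dy in dirs:` neighbour loop, for the popped cell (x, y)
def pvStepA (mask : Nat) (w h : Int) (x y : Int)
    (st : List (Int × Int) × PySem.Set (Int × Int)) (d : Int × Int) :
    List (Int × Int) × PySem.Set (Int × Int) :=
  let nx := x + d.1
  let ny := y + d.2
  if 0 ≤ nx ∧ nx < w ∧ 0 ≤ ny ∧ ny < h ∧ (nx, ny) ∉ st.2 then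
    if pvBit mask w nx ny then (st.1 ++ [(nx, ny)], PySem.Set.add st.2 (nx, ny))
    else st
  else st

-- A's `while stack:` loop; fuel only makes the recursion structural, 2*len(cells)+1 is enough
-- (proved in pvDfsA_good below), so the 0-fuel branch is never taken on the inputs A runs on.
def pvDfsA (mask : Nat) (w h : Int) (diagonal : Bool) :
    Nat → List (Int × Int) → PySem.Set (Int × Int) → PySem.Set (Int × Int)
  | 0, _, seen => seen
  | fuel + 1, stack, seen =>
    match stack.getLast? with          -- stack.pop() takes the LAST element
    | none => seen
    | some (x, y) =>
      let st1 := pvDirs4.foldl (pvStepA mask w h x y) (stack.dropLast, seen)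
      let st2 := if diagonal then pvDirsDiag.foldl (pvStepA mask w h x y) st1 else st1
      pvDfsA mask w h diagonal fuel st2.1 st2.2

def pvIsConnectedA (mask : Nat) (w h : Int) (diagonal : Bool) : Bool :=
  let cells := pvCellsA mask w h
  match cells with
  | [] => false                        -- `if not cells: return False`
  | c0 :: _ =>
    let seen := pvDfsA mask w h diagonal (2 * cells.length + 1) [c0] (PySem.Set.ofList [c0])
    seen.length == cells.length        -- len(seen) == len(cells)

def pvMaskToArray (mask : Nat) (w h : Int) : List (List Int) :=
  (PySem.List.pyRange 0 h 1).map (fun y =>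
    (PySem.List.pyRange 0 w 1).map (fun x => if pvBit mask w x y then (1 : Int) else 0))

def generate_class_masks (w : Int) (h_ : Int) (diagonal : Bool) : List (List (List Int)) :=
  let total := (w * h_).toNat          -- Pre_ demands 0 ≤ w*h_ (Python's 1 << total raises below 0)
  (PySem.List.pyRange 1 ((2 : Int) ^ total) 1).foldl (fun masks m =>
    let mask := m.toNat                -- every m in range(1, 1 << total) is ≥ 1
    if pvIsConnectedA mask w h_ diagonal then
      let cells := pvCellsA mask w h_
      -- min/max of a nonempty generator; the .getD defaults are never read (cells ≠ [] here)
      let min_x := (PySem.List.min? (cells.map Prod.fst) (fun v => v)).getD 0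
      let max_x := (PySem.List.max? (cells.map Prod.fst) (fun v => v)).getD 0
      let min_y := (PySem.List.min? (cells.map Prod.snd) (fun v => v)).getD 0
      let max_y := (PySem.List.max? (cells.map Prod.snd) (fun v => v)).getD 0
      if max_x - min_x + 1 ≠ w ∨ max_y - min_y + 1 ≠ h_ then masks
      else masks ++ [pvMaskToArray mask w h_]
    else masks) []

-- ===== PORT B =====

-- _adjacent(a, b, diagonal)
def pvDirsB (diagonal : Bool) : List (Int × Int) :=
  [(-1, 0), (1, 0), (0, -1), (0, 1)] ++
    (if diagonal then [(-1, -1), (-1, 1), (1, -1), (1, 1)] else [])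

def pvAdjacentB (diagonal : Bool) (a b : Int × Int) : Bool :=
  decide ((b.1 - a.1, b.2 - a.2) ∈ pvDirsB diagonal)

-- B's `while frontier:` closure loop; fuel only makes the recursion structural,
-- 2*len(cells)+1 is enough (proved in pvGrowB_good below).
def pvGrowB (cells : List (Int × Int)) (diagonal : Bool) :
    Nat → List (Int × Int) → List (Int × Int) → List (Int × Int)
  | 0, seen, _ => seen
  | fuel + 1, seen, frontier =>
    if frontier.isEmpty then seen
    else
      let f' := cells.filter (fun c =>
        decide (c ∉ seen) && frontier.any (fun f => pvAdjacentB diagonal f c))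
      pvGrowB cells diagonal fuel (seen ++ f') f'

def pvConnectedB (cells : List (Int × Int)) (diagonal : Bool) : Bool :=
  match cells with
  | [] => false                        -- unreachable: the caller only passes nonempty cells
  | c0 :: _ =>
    let seen := pvGrowB cells diagonal (2 * cells.length + 1) [c0] [c0]
    seen.length == cells.length

-- one fold over cells for all four bounding-box extrema
def pvBBoxB (c0 : Int × Int) (cells : List (Int × Int)) : Int × Int × Int × Int :=
  cells.foldl (fun acc c =>
    (if c.1 < acc.1 then c.1 else acc.1,
     if acc.2.1 < c.1 then c.1 else acc.2.1,
     if c.2 < acc.2.2.1 then c.2 else acc.2.2.1,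
     if acc.2.2.2 < c.2 then c.2 else acc.2.2.2)) (c0.1, c0.1, c0.2, c0.2)

def pvCellsB (mask : Nat) (w h : Int) : List (Int × Int) :=
  (PySem.List.pyRange 0 h 1).flatMap (fun y =>
    (PySem.List.pyRange 0 w 1).filterMap (fun x =>
      if pvBit mask w x y then some (x, y) else none))

def generate_class_masks_alt (w : Int) (h_ : Int) (diagonal : Bool) : List (List (List Int)) :=
  let total := (w * h_).toNat
  (PySem.List.pyRange 1 ((2 : Int) ^ total) 1).foldl (fun out m =>
    let mask := m.toNat
    let cells := pvCellsB mask w h_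
    match cells with
    | [] => out
    | c0 :: rest =>
      let bb := pvBBoxB c0 (c0 :: rest)
      if bb.2.1 - bb.1 + 1 ≠ w ∨ bb.2.2.2 - bb.2.2.1 + 1 ≠ h_ then out
      else if pvConnectedB (c0 :: rest) diagonal then
        out ++ [(PySem.List.pyRange 0 h_ 1).map (fun y =>
          (PySem.List.pyRange 0 w 1).map (fun x => if pvBit mask w x y then (1 : Int) else 0))]
      else out) []

-- ===== PRECONDITION & SPEC =====
-- Python computes 1 << (w*h); for w*h < 0 both A and B raise ValueError, so exactly 0 ≤ w*h is admitted.
def Pre_generate_class_masks (w : Int) (h_ : Int) (diagonal : Bool) : Prop := 0 ≤ w * h_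
instance (w : Int) (h_ : Int) (diagonal : Bool) : Decidable (Pre_generate_class_masks w h_ diagonal) := by
  unfold Pre_generate_class_masks; infer_instance

def pvWitness_generate_class_masks : Int × Int × Bool := (2, 1, true)

def Spec_generate_class_masks (w : Int) (h_ : Int) (diagonal : Bool) (out : List (List (List Int))) : Prop := out = generate_class_masks_alt w h_ diagonal
instance (w : Int) (h_ : Int) (diagonal : Bool) (out : List (List (List Int))) : Decidable (Spec_generate_class_masks w h_ diagonal out) := by unfold Spec_generate_class_masks; infer_instance

-- ===== CLAIM (what is proved, stated in full; the proofs are below) =====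
def Claim_equal_generate_class_masks : Prop := ∀ (w : Int) (h_ : Int) (diagonal : Bool), Dom_generate_class_masks w h_ diagonal → Pre_generate_class_masks w h_ diagonal → Spec_generate_class_masks w h_ diagonal (generate_class_masks w h_ diagonal)

-- ===== LEMMAS AND PROOFS =====

-- membership characterisation of the cell comprehension
theorem pv_mem_cells (mask : Nat) (w h : Int) (p : Int × Int) :
    p ∈ pvCellsA mask w h ↔
      0 ≤ p.1 ∧ p.1 < w ∧ 0 ≤ p.2 ∧ p.2 < h ∧ pvBit mask w p.1 p.2 = true := by
  obtain ⟨a, b⟩ := p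
  simp only [pvCellsA, List.mem_flatMap, List.mem_filterMap, PySem.List.mem_pyRange_one]
  constructor
  · rintro ⟨y, hy, x, hx, hif⟩
    by_cases hb : pvBit mask w x y = true
    · rw [if_pos hb] at hif
      obtain ⟨rfl, rfl⟩ := Prod.mk.injEq .. ▸ Option.some.injEq .. ▸ hif
      exact ⟨hx.1, hx.2, hy.1, hy.2, hb⟩
    · rw [if_neg hb] at hif; cases hif
  · rintro ⟨h1, h2, h3, h4, h5⟩
    exact ⟨b, ⟨h3, h4⟩, a, ⟨h1, h2⟩, by rw [if_pos h5]⟩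

theorem pv_nodup_cells (mask : Nat) (w h : Int) : (pvCellsA mask w h).Nodup := by
  rw [pvCellsA, List.nodup_flatMap]
  constructor
  · intro y _
    apply List.Nodup.filterMap ?_ (PySem.List.nodup_pyRange_one 0 w)
    intro a a' b hb hb'
    split at hb
    · cases hb
      split at hb'
      · cases hb'; rfl
      · cases hb'
    · cases hb
  · apply (PySem.List.nodup_pyRange_one 0 h).imp
    intro a b hab
    intro p hp hq
    apply hab
    rw [List.mem_filterMap] at hp hq
    obtain ⟨x, _, hx⟩ := hp
    obtain ⟨x', _, hx'⟩ := hq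
    split at hx
    · cases hx
      split at hx'
      · cases hx'; rfl
      · cases hx'
    · cases hx

-- one step of adjacency inside the filled cells
def pvStepRel (cells : List (Int × Int)) (diagonal : Bool) (a b : Int × Int) : Prop :=
  b ∈ cells ∧ pvAdjacentB diagonal a b = true

-- what both searches compute: a nodup list of filled cells containing the start,
-- closed under adjacency into cells, all of whose members are reachable from the start
def pvGood (cells : List (Int × Int)) (diagonal : Bool) (c0 : Int × Int)
    (S : List (Int × Int)) : Prop :=
  S.Nodup ∧ (∀ c ∈ S, c ∈ cells) ∧ c0 ∈ S ∧
  (∀ c ∈ S, ∀ d ∈ cells, pvAdjacentB diagonal c d = true → d ∈ S) ∧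
  (∀ c ∈ S, Relation.ReflTransGen (pvStepRel cells diagonal) c0 c)

theorem pvGood_mem {cells : List (Int × Int)} {diagonal : Bool} {c0 : Int × Int}
    {S : List (Int × Int)} (hg : pvGood cells diagonal c0 S) (x : Int × Int) :
    x ∈ S ↔ Relation.ReflTransGen (pvStepRel cells diagonal) c0 x := by
  obtain ⟨-, -, h0, hcl, hrch⟩ := hg
  constructor
  · exact hrch x
  · intro hr
    induction hr with
    | refl => exact h0
    | tail _ hstep ih => exact hcl _ ih _ hstep.1 hstep.2

theorem pvGood_length {cells : List (Int × Int)} {diagonal : Bool} {c0 : Int × Int}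
    {S S' : List (Int × Int)} (hg : pvGood cells diagonal c0 S)
    (hg' : pvGood cells diagonal c0 S') : S.length = S'.length := by
  refine List.Perm.length_eq ?_
  rw [List.perm_ext_iff_of_nodup hg.1 hg'.1]
  intro a
  rw [pvGood_mem hg, pvGood_mem hg']

theorem pvAdjacentB_iff (diagonal : Bool) (x y : Int) (p : Int × Int) :
    pvAdjacentB diagonal (x, y) p = true ↔
      ∃ d ∈ pvDirsB diagonal, p = (x + d.1, y + d.2) := by
  rw [pvAdjacentB, decide_eq_true_iff]
  constructor
  · intro hm
    exact ⟨(p.1 - x, p.2 - y), hm, by obtain ⟨a, b⟩ := p; simp⟩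
  · rintro ⟨d, hd, rfl⟩
    simpa using hd

-- effect of A's neighbour loop over a direction list: stack and seen grow by the same
-- block `nw` of fresh cells, and afterwards every cells-neighbour of (x,y) along ds is seen
theorem pvFoldStepA (mask : Nat) (w h x y : Int) :
    ∀ (ds : List (Int × Int)) (st sn : List (Int × Int)),
    ∃ nw : List (Int × Int),
      ds.foldl (pvStepA mask w h x y) (st, sn) = (st ++ nw, sn ++ nw) ∧
      (∀ p ∈ nw, p ∉ sn ∧ p ∈ pvCellsA mask w h ∧ ∃ d ∈ ds, p = (x + d.1, y + d.2)) ∧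
      (sn.Nodup → (sn ++ nw).Nodup) ∧
      (∀ d ∈ ds, (x + d.1, y + d.2) ∈ pvCellsA mask w h → (x + d.1, y + d.2) ∈ sn ++ nw)
  | [], st, sn => ⟨[], by simp⟩
  | d :: ds, st, sn => by
    rw [List.foldl_cons]
    by_cases hmem : (x + d.1, y + d.2) ∈ pvCellsA mask w h
    · by_cases hsn : (x + d.1, y + d.2) ∈ sn
      · have hstep : pvStepA mask w h x y (st, sn) d = (st, sn) := by
          rw [pvStepA]
          simp only []
          rw [if_neg (by simp [hsn])]
        rw [hstep]
        obtain ⟨nw, h1, h2, h3, h4⟩ := pvFoldStepA mask w h x y ds st sn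
        refine ⟨nw, h1, ?_, h3, ?_⟩
        · exact fun p hp => ⟨(h2 p hp).1, (h2 p hp).2.1, (h2 p hp).2.2.imp
            (fun d' hd' => ⟨List.mem_cons_of_mem _ hd'.1, hd'.2⟩)⟩
        · intro d' hd' hc
          rcases List.mem_cons.1 hd' with rfl | hd'
          · exact List.mem_append_left _ hsn
          · exact h4 d' hd' hc
      · rw [pv_mem_cells] at hmem
        have hstep : pvStepA mask w h x y (st, sn) d =
            (st ++ [(x + d.1, y + d.2)], sn ++ [(x + d.1, y + d.2)]) := by
          rw [pvStepA]
          simp only []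
          rw [if_pos ⟨hmem.1, hmem.2.1, hmem.2.2.1, hmem.2.2.2.1, hsn⟩,
              if_pos hmem.2.2.2.2]
          rw [PySem.Set.add]
          simp [hsn]
        rw [hstep]
        obtain ⟨nw, h1, h2, h3, h4⟩ :=
          pvFoldStepA mask w h x y ds (st ++ [(x + d.1, y + d.2)]) (sn ++ [(x + d.1, y + d.2)])
        refine ⟨(x + d.1, y + d.2) :: nw, by simpa using h1, ?_, ?_, ?_⟩
        · intro p hp
          rcases List.mem_cons.1 hp with rfl | hp
          · exact ⟨hsn, (pv_mem_cells ..).2 hmem, d, List.mem_cons_self .., rfl⟩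
          · obtain ⟨hpn, hpc, hpd⟩ := h2 p hp
            exact ⟨fun hx => hpn (List.mem_append_left _ hx), hpc,
              hpd.imp (fun d' hd' => ⟨List.mem_cons_of_mem _ hd'.1, hd'.2⟩)⟩
        · intro hnd
          have hnd2 : (sn ++ [(x + d.1, y + d.2)]).Nodup := by
            rw [List.nodup_append]
            refine ⟨hnd, List.nodup_singleton _, ?_⟩
            intro a ha b hb
            rw [List.mem_singleton] at hb
            subst hb
            exact fun he => hsn (he ▸ ha)
          have := h3 hnd2
          simpa using this
        · intro d' hd' hc
          rcases List.mem_cons.1 hd' with rfl | hd'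
          · simp
          · have := h4 d' hd' hc
            simpa using this
    · have hstep : pvStepA mask w h x y (st, sn) d = (st, sn) := by
        rw [pvStepA]
        simp only []
        rw [pv_mem_cells] at hmem
        by_cases hb : (0 ≤ x + d.1 ∧ x + d.1 < w ∧ 0 ≤ y + d.2 ∧ y + d.2 < h ∧
            (x + d.1, y + d.2) ∉ sn)
        · rw [if_pos hb, if_neg (fun hbit => hmem ⟨hb.1, hb.2.1, hb.2.2.1, hb.2.2.2.1, hbit⟩)]
        · rw [if_neg hb]
      rw [hstep]
      obtain ⟨nw, h1, h2, h3, h4⟩ := pvFoldStepA mask w h x y ds st sn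
      refine ⟨nw, h1, ?_, h3, ?_⟩
      · exact fun p hp => ⟨(h2 p hp).1, (h2 p hp).2.1, (h2 p hp).2.2.imp
          (fun d' hd' => ⟨List.mem_cons_of_mem _ hd'.1, hd'.2⟩)⟩
      · intro d' hd' hc
        rcases List.mem_cons.1 hd' with rfl | hd'
        · exact absurd hc hmem
        · exact h4 d' hd' hc

theorem pvDirsB_eq (diagonal : Bool) :
    pvDirsB diagonal = pvDirs4 ++ (if diagonal then pvDirsDiag else []) := by
  cases diagonal <;> rfl

-- the DFS loop, started in a good state with enough fuel, returns a pvGood set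
theorem pvDfsA_good (mask : Nat) (w h : Int) (diagonal : Bool) (c0 : Int × Int) :
    ∀ (fuel : Nat) (stack seen : List (Int × Int)),
    seen.Nodup →
    (∀ c ∈ seen, c ∈ pvCellsA mask w h) →
    c0 ∈ seen →
    (∀ c ∈ stack, c ∈ seen) →
    (∀ c ∈ seen, c ∉ stack → ∀ d ∈ pvCellsA mask w h,
        pvAdjacentB diagonal c d = true → d ∈ seen) →
    (∀ c ∈ seen, Relation.ReflTransGen (pvStepRel (pvCellsA mask w h) diagonal) c0 c) →
    2 * ((pvCellsA mask w h).length - seen.length) + stack.length + 1 ≤ fuel →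
    pvGood (pvCellsA mask w h) diagonal c0 (pvDfsA mask w h diagonal fuel stack seen)
  | 0, stack, seen => by intro _ _ _ _ _ _ hf; omega
  | fuel + 1, stack, seen => by
    intro hnd hsub h0 hst hcl hrch hf
    rw [pvDfsA]
    cases hLast : stack.getLast? with
    | none =>
      rw [List.getLast?_eq_none_iff] at hLast
      exact ⟨hnd, hsub, h0, fun c hc d hd ha => hcl c hc (by simp [hLast]) d hd ha, hrch⟩
    | some xy =>
      obtain ⟨x, y⟩ := xy
      rw [List.getLast?_eq_some_iff] at hLast
      obtain ⟨prev, rfl⟩ := hLast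
      simp only []
      obtain ⟨nw, heq, hnw, hnwnd, hcov⟩ :=
        pvFoldStepA mask w h x y (pvDirsB diagonal) prev seen
      have hst2 : (if diagonal
            then pvDirsDiag.foldl (pvStepA mask w h x y)
              (pvDirs4.foldl (pvStepA mask w h x y) ((prev ++ [(x, y)]).dropLast, seen))
            else pvDirs4.foldl (pvStepA mask w h x y) ((prev ++ [(x, y)]).dropLast, seen))
          = (prev ++ nw, seen ++ nw) := by
        rw [List.dropLast_concat]
        cases diagonal
        · rw [if_neg (by simp)]
          rw [pvDirsB_eq] at heq
          simpa using heq
        · rw [if_pos rfl, ← List.foldl_append]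
          rw [pvDirsB_eq] at heq
          simpa using heq
      rw [hst2]
      have hxyseen : (x, y) ∈ seen := hst _ (by simp)
      have hxycells : (x, y) ∈ pvCellsA mask w h := hsub _ hxyseen
      have hnd2 : (seen ++ nw).Nodup := hnwnd hnd
      have hsub2 : ∀ c ∈ seen ++ nw, c ∈ pvCellsA mask w h := by
        intro c hc
        rcases List.mem_append.1 hc with hc | hc
        · exact hsub c hc
        · exact (hnw c hc).2.1
      have hlen2 : (seen ++ nw).length ≤ (pvCellsA mask w h).length :=
        List.Subperm.length_le (hnd2.subperm hsub2)
      apply pvDfsA_good mask w h diagonal c0 fuel (prev ++ nw) (seen ++ nw) hnd2 hsub2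
        (List.mem_append_left _ h0)
      · intro c hc
        rcases List.mem_append.1 hc with hc | hc
        · exact List.mem_append_left _ (hst c (List.mem_append_left _ hc))
        · exact List.mem_append_right _ hc
      · intro c hc hcnot d hd ha
        rcases List.mem_append.1 hc with hc | hc
        · by_cases hcxy : c = (x, y)
          · subst hcxy
            obtain ⟨dir, hdir, rfl⟩ := (pvAdjacentB_iff diagonal x y d).1 ha
            exact hcov dir hdir hd
          · have hcstack : c ∉ prev ++ [(x, y)] := by
              intro hmem
              rcases List.mem_append.1 hmem with hmem | hmem
              · exact hcnot (List.mem_append_left _ hmem)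
              · exact hcxy (by simpa using hmem)
            exact List.mem_append_left _ (hcl c hc hcstack d hd ha)
        · exact absurd (List.mem_append_right _ hc) hcnot
      · intro c hc
        rcases List.mem_append.1 hc with hc | hc
        · exact hrch c hc
        · obtain ⟨hnotsn, hcells, dir, hdir, rfl⟩ := hnw c hc
          refine Relation.ReflTransGen.tail (hrch _ hxyseen) ?_
          exact ⟨hcells, (pvAdjacentB_iff diagonal x y _).2 ⟨dir, hdir, rfl⟩⟩
      · have hknw : seen.length + nw.length ≤ (pvCellsA mask w h).length := by
          simpa using hlen2
        have l1 : (seen ++ nw).length = seen.length + nw.length := List.length_append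
        have l2 : (prev ++ nw).length = prev.length + nw.length := List.length_append
        have l3 : (prev ++ [(x, y)]).length = prev.length + 1 := by simp
        rw [l1, l2]
        rw [l3] at hf
        omega

-- the frontier-closure loop, started in a good state with enough fuel, returns a pvGood set
theorem pvGrowB_good (cells : List (Int × Int)) (hcnd : cells.Nodup) (diagonal : Bool)
    (c0 : Int × Int) :
    ∀ (fuel : Nat) (seen frontier : List (Int × Int)),
    seen.Nodup →
    (∀ c ∈ seen, c ∈ cells) →
    c0 ∈ seen →
    (∀ c ∈ frontier, c ∈ seen) →
    (∀ c ∈ seen, c ∉ frontier → ∀ d ∈ cells, pvAdjacentB diagonal c d = true → d ∈ seen) →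
    (∀ c ∈ seen, Relation.ReflTransGen (pvStepRel cells diagonal) c0 c) →
    2 * (cells.length - seen.length) + 2 ≤ fuel →
    pvGood cells diagonal c0 (pvGrowB cells diagonal fuel seen frontier)
  | 0, seen, frontier => by intro _ _ _ _ _ _ hf; omega
  | fuel + 1, seen, frontier => by
    intro hnd hsub h0 hfr hcl hrch hf
    rw [pvGrowB]
    by_cases hemp : frontier.isEmpty
    · rw [if_pos hemp]
      rw [List.isEmpty_iff] at hemp
      exact ⟨hnd, hsub, h0, fun c hc d hd ha => hcl c hc (by simp [hemp]) d hd ha, hrch⟩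
    · rw [if_neg hemp]
      simp only []
      set f' := cells.filter (fun c =>
        decide (c ∉ seen) && frontier.any (fun f => pvAdjacentB diagonal f c)) with hf'
      have hmemf' : ∀ c, c ∈ f' ↔
          c ∈ cells ∧ c ∉ seen ∧ ∃ fr ∈ frontier, pvAdjacentB diagonal fr c = true := by
        intro c
        rw [hf', List.mem_filter]
        simp [List.any_eq_true]
      have hf'nd : f'.Nodup := hcnd.filter _
      have hf'sub : ∀ c ∈ f', c ∈ cells := fun c hc => ((hmemf' c).1 hc).1
      have hf'new : ∀ c ∈ f', c ∉ seen := fun c hc => ((hmemf' c).1 hc).2.1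
      have hnd2 : (seen ++ f').Nodup := by
        rw [List.nodup_append]
        exact ⟨hnd, hf'nd, fun a ha b hb he => hf'new b hb (he ▸ ha)⟩
      have hsub2 : ∀ c ∈ seen ++ f', c ∈ cells := by
        intro c hc
        rcases List.mem_append.1 hc with hc | hc
        · exact hsub c hc
        · exact hf'sub c hc
      have hcl2 : ∀ c ∈ seen ++ f', c ∉ f' → ∀ d ∈ cells,
          pvAdjacentB diagonal c d = true → d ∈ seen ++ f' := by
        intro c hc hcnot d hd ha
        rcases List.mem_append.1 hc with hc | hc
        · by_cases hds : d ∈ seen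
          · exact List.mem_append_left _ hds
          · by_cases hcfr : c ∈ frontier
            · exact List.mem_append_right _ ((hmemf' d).2 ⟨hd, hds, c, hcfr, ha⟩)
            · exact List.mem_append_left _ (hcl c hc hcfr d hd ha)
        · exact absurd hc hcnot
      have hrch2 : ∀ c ∈ seen ++ f',
          Relation.ReflTransGen (pvStepRel cells diagonal) c0 c := by
        intro c hc
        rcases List.mem_append.1 hc with hc | hc
        · exact hrch c hc
        · obtain ⟨hccells, -, fr, hfrm, ha⟩ := (hmemf' c).1 hc
          exact Relation.ReflTransGen.tail (hrch fr (hfr fr hfrm)) ⟨hccells, ha⟩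
      by_cases hf'emp : f' = []
      · -- next round sees the empty frontier and returns seen (one more unit of fuel)
        have hfuel1 : 1 ≤ fuel := by omega
        obtain ⟨fuel', rfl⟩ := Nat.exists_eq_add_of_le hfuel1
        rw [hf'emp]
        rw [show (1 + fuel') = fuel' + 1 by omega]
        rw [pvGrowB]
        rw [if_pos (by simp)]
        rw [List.append_nil]
        refine ⟨hnd, hsub, h0, ?_, hrch⟩
        intro c hc d hd ha
        have := hcl2 c (List.mem_append_left _ hc) (by simp [hf'emp]) d hd ha
        simpa [hf'emp] using this
      · have hk : 1 ≤ f'.length := by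
          have := List.length_pos_iff.2 hf'emp
          omega
        have hlen2 : (seen ++ f').length ≤ cells.length :=
          List.Subperm.length_le (hnd2.subperm hsub2)
        apply pvGrowB_good cells hcnd diagonal c0 fuel (seen ++ f') f' hnd2 hsub2
          (List.mem_append_left _ h0) (fun c hc => List.mem_append_right _ hc) hcl2 hrch2
        have l1 : (seen ++ f').length = seen.length + f'.length := List.length_append
        rw [l1]
        rw [l1] at hlen2
        omega

theorem pvIsConnectedA_spec (mask : Nat) (w h : Int) (diagonal : Bool) (c0 : Int × Int)
    (t : List (Int × Int)) (hc : pvCellsA mask w h = c0 :: t) :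
    ∃ S, pvGood (pvCellsA mask w h) diagonal c0 S ∧
      pvIsConnectedA mask w h diagonal = (S.length == (pvCellsA mask w h).length) := by
  refine ⟨pvDfsA mask w h diagonal (2 * (pvCellsA mask w h).length + 1) [c0]
    (PySem.Set.ofList [c0]), ?_, ?_⟩
  · have hofl : PySem.Set.ofList [c0] = [c0] :=
      PySem.Set.ofList_eq_self_of_nodup [c0] (List.nodup_singleton c0)
    rw [hofl]
    refine pvDfsA_good mask w h diagonal c0 _ [c0] [c0] (List.nodup_singleton c0)
      ?_ ?_ ?_ ?_ ?_ ?_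
    · intro c hcm
      rw [List.mem_singleton] at hcm
      rw [hcm, hc]
      exact List.mem_cons_self ..
    · simp
    · simp
    · intro c hcm hcn
      rw [List.mem_singleton] at hcm
      exact absurd (by simp [hcm]) hcn
    · intro c hcm
      rw [List.mem_singleton] at hcm
      exact hcm ▸ Relation.ReflTransGen.refl
    · have : 1 ≤ (pvCellsA mask w h).length := by rw [hc]; simp
      simp only [List.length_singleton]
      omega
  · rw [pvIsConnectedA, hc]

theorem pvConnectedB_spec (cells : List (Int × Int)) (hcnd : cells.Nodup) (diagonal : Bool)
    (c0 : Int × Int) (t : List (Int × Int)) (hc : cells = c0 :: t) :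
    ∃ S, pvGood cells diagonal c0 S ∧
      pvConnectedB cells diagonal = (S.length == cells.length) := by
  refine ⟨pvGrowB cells diagonal (2 * cells.length + 1) [c0] [c0], ?_, ?_⟩
  · apply pvGrowB_good cells hcnd diagonal c0 _ [c0] [c0] (List.nodup_singleton c0)
    · intro c hcm
      rw [List.mem_singleton] at hcm
      rw [hcm, hc]
      exact List.mem_cons_self ..
    · simp
    · simp
    · intro c hcm hcn
      rw [List.mem_singleton] at hcm
      exact absurd (by simp [hcm]) hcn
    · intro c hcm
      rw [List.mem_singleton] at hcm
      exact hcm ▸ Relation.ReflTransGen.refl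
    · have : 1 ≤ cells.length := by rw [hc]; simp
      simp only [List.length_singleton]
      omega
  · rw [hc, pvConnectedB]

theorem pvCellsB_eq : pvCellsB = pvCellsA := rfl

theorem pvConn_eq (mask : Nat) (w h : Int) (diagonal : Bool) (c0 : Int × Int)
    (t : List (Int × Int)) (hc : pvCellsA mask w h = c0 :: t) :
    pvIsConnectedA mask w h diagonal = pvConnectedB (pvCellsA mask w h) diagonal := by
  obtain ⟨S, hgS, hA⟩ := pvIsConnectedA_spec mask w h diagonal c0 t hc
  obtain ⟨S', hgS', hB⟩ := pvConnectedB_spec (pvCellsA mask w h) (pv_nodup_cells mask w h)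
    diagonal c0 t hc
  rw [hA, hB, pvGood_length hgS hgS']

theorem pv_if_min (m x : Int) : (if x < m then x else m) = min m x := by
  rcases lt_or_ge x m with hlt | hge
  · rw [if_pos hlt, min_eq_right hlt.le]
  · rw [if_neg (not_lt.2 hge), min_eq_left hge]

theorem pv_if_max (m x : Int) : (if m < x then x else m) = max m x := by
  rcases lt_or_ge m x with hlt | hge
  · rw [if_pos hlt, max_eq_right hlt.le]
  · rw [if_neg (not_lt.2 hge), max_eq_left hge]

theorem pvBBoxB_foldl : ∀ (t : List (Int × Int)) (a b c d : Int),
    t.foldl (fun acc c =>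
      (if c.1 < acc.1 then c.1 else acc.1,
       if acc.2.1 < c.1 then c.1 else acc.2.1,
       if c.2 < acc.2.2.1 then c.2 else acc.2.2.1,
       if acc.2.2.2 < c.2 then c.2 else acc.2.2.2)) (a, b, c, d) =
      ((t.map Prod.fst).foldl min a, (t.map Prod.fst).foldl max b,
       (t.map Prod.snd).foldl min c, (t.map Prod.snd).foldl max d)
  | [], a, b, c, d => rfl
  | p :: t, a, b, c, d => by
    rw [List.foldl_cons, List.map_cons, List.map_cons, List.foldl_cons, List.foldl_cons,
      List.foldl_cons, List.foldl_cons]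
    show List.foldl _ ((if p.1 < a then p.1 else a, if b < p.1 then p.1 else b,
      if p.2 < c then p.2 else c, if d < p.2 then p.2 else d) :
        Int × Int × Int × Int) t = _
    rw [pvBBoxB_foldl t]
    rw [pv_if_min, pv_if_max, pv_if_min, pv_if_max]

theorem pvBBoxB_eq (c0 : Int × Int) (t : List (Int × Int)) :
    pvBBoxB c0 (c0 :: t) =
      ((PySem.List.min? ((c0 :: t).map Prod.fst) (fun v => v)).getD 0,
       (PySem.List.max? ((c0 :: t).map Prod.fst) (fun v => v)).getD 0,
       (PySem.List.min? ((c0 :: t).map Prod.snd) (fun v => v)).getD 0,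
       (PySem.List.max? ((c0 :: t).map Prod.snd) (fun v => v)).getD 0) := by
  rw [pvBBoxB, List.foldl_cons]
  simp only [lt_irrefl, ite_false]
  rw [pvBBoxB_foldl]
  rw [List.map_cons, List.map_cons, PySem.List.min?_id_cons, PySem.List.max?_id_cons,
    PySem.List.min?_id_cons, PySem.List.max?_id_cons]
  rfl

theorem pv_main (w h_ : Int) (diagonal : Bool) :
    generate_class_masks w h_ diagonal = generate_class_masks_alt w h_ diagonal := by
  rw [generate_class_masks, generate_class_masks_alt]
  apply List.foldl_ext
  intro acc m
  simp only [pvCellsB_eq]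
  cases hc : pvCellsA m.toNat w h_ with
  | nil =>
    intro _
    have hcA : pvIsConnectedA m.toNat w h_ diagonal = false := by
      rw [pvIsConnectedA, hc]
    rw [hcA]
    simp
  | cons c0 t =>
    intro _
    have hconn := pvConn_eq m.toNat w h_ diagonal c0 t hc
    rw [hc] at hconn
    simp only []
    rw [pvBBoxB_eq, hconn]
    cases hB : pvConnectedB (c0 :: t) diagonal with
    | false => simp
    | true =>
      simp only [pvMaskToArray, ↓reduceIte]

-- ===== VERDICT (by name: the statement is the Claim_ definition above) =====
theorem generate_class_masks_spec : Claim_equal_generate_class_masks := by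
  intro w h_ diagonal _ _
  unfold Spec_generate_class_masks
  exact pv_main w h_ diagonal
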